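-- pv_equiv track=rewrite | github.com/OTOYO1020/ChatDev_Intermediate | WareHouse/D_283__20250505232300/main.py | check_parentheses_and_letters
-- ===== SOURCE A (Python) =====
-- def check_parentheses_and_letters(S):
--     '''
--     Checks if the string S has valid parentheses and letters.
--     '''
--     box = set()
--     stack = []  # Stack to keep track of indices of '('
--     added_letters_stack = []  # Stack to track sets of letters added after each '('
--     for i in range(len(S)):
--         if S[i].islower():
--             if S[i] in box:
--                 return "NO"
--             box.add(S[i])
--             # Track letters added after the last '('
--             if added_letters_stack:
--                 added_letters_stack[-1].add(S[i])  # Add to the last set corresponding to the last '('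
--         elif S[i] == '(':
--             stack.append(i)  # Push index of '(' onto the stack
--             added_letters_stack.append(set())  # Push a new set for this '('
--         elif S[i] == ')':
--             if not stack:  # If stack is empty, there's no matching '('
--                 return "NO"
--             j = stack.pop()  # Pop the last '(' index
--             letters_to_remove = added_letters_stack.pop()  # Pop the last set
--             # Check if the substring S[j:i] is valid
--             if not is_good_string(S[j:i + 1]):
--                 return "NO"
--             # Remove letters added after the last '('
--             for letter in letters_to_remove:
--                 box.discard(letter)
--     # After processing all characters, check if there are unmatched '('
--     if stack:
--         return "NO"
--     return "YES"
--
-- def is_good_string(substring):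
--     '''
--     Checks if the substring is a good string, meaning it contains balanced parentheses.
--     '''
--     balance = 0
--     for char in substring:
--         if char == '(':
--             balance += 1
--         elif char == ')':
--             balance -= 1
--         if balance < 0:  # More ')' than '(' at any point
--             return False
--     return balance == 0  # Must be balanced at the end
-- ===== SOURCE B (Python) =====
-- def check_parentheses_and_letters(S):
--     '''
--     Checks if the string S has valid parentheses and letters.
--     '''
--     def parse(i, active):
--         # Scan one scope starting at i with `active` = letters visible in this
--         # scope chain. Return the index of the ')' closing this scope, len(S)
--         # if the end of the string is reached, or None on a violation.
--         if i >= len(S):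
--             return i
--         c = S[i]
--         if c == ')':
--             return i
--         if c == '(':
--             j = parse(i + 1, active)
--             if j is None or j >= len(S):
--                 return None  # violation inside, or unmatched '('
--             return parse(j + 1, active)  # resume after the matching ')'
--         if c.islower():
--             if c in active:
--                 return None
--             return parse(i + 1, active | {c})
--         return parse(i + 1, active)
--
--     return "YES" if parse(0, frozenset()) == len(S) else "NO"
-- ===== Notes on version B (the rewrite author's own statement) =====
-- stated objective: simpler
-- what changed: A's single pass with an explicit index stack, a global letter box, per-scope added-letter sets and a substring balance re-check at every scope close is replaced by a recursive-descent parser: one helper scans a scope, recurses into each parenthesised child with the set of letters currently visible, and returns the index closing the scope, so the stacks and the slice re-validation disappear.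
import Mathlib
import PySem

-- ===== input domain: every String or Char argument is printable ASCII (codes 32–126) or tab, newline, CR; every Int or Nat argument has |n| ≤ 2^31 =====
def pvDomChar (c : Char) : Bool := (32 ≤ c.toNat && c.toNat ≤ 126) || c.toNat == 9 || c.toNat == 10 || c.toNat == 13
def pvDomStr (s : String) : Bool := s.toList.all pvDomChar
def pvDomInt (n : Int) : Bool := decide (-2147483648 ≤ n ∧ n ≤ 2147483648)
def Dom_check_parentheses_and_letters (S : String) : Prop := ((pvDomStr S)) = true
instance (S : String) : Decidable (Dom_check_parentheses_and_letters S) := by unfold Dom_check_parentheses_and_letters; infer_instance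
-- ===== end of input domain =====

-- B replaces A's index-stack + per-scope added-letter sets + substring balance re-check by a
-- recursive-descent parser over the parenthesis nesting (objective: simpler; same return value
-- on every input).

-- ===== PORT A =====

-- port of helper is_good_string (the running `balance` loop with its early False)
def pvIsGoodAux : List Char → Int → Bool
  | [], bal => bal == 0
  | c :: cs, bal =>
    let bal' := bal + (if c = '(' then 1 else if c = ')' then -1 else 0)
    if bal' < 0 then false else pvIsGoodAux cs bal'

def pvIsGood (sub : List Char) : Bool := pvIsGoodAux sub 0

-- A's `for i in range(len(S))` loop with its early returns, state (box, stack, added_letters_stack);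
-- the slice S[j:i+1] (0 ≤ j ≤ i < len) is ported as (l.drop j).take (i+1-j) = PySem.List.slice_natCast;
-- the `for letter in letters_to_remove: box.discard(letter)` loop is a foldl of Set.discard (its
-- result is iteration-order independent).
def pvLoopA (l : List Char) (i : Nat) (box : PySem.Set Char) (stack : List Nat)
    (als : List (PySem.Set Char)) : String :=
  if h : i < l.length then
    let c := l[i]
    if PySem.Chars.islower c then
      (if box.contains c then "NO"
       else
         let box' := box.add c
         let als' := if als.isEmpty then als
                     else als.dropLast ++ [(als.getLastD PySem.Set.empty).add c]
         pvLoopA l (i+1) box' stack als')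
    else if c = '(' then
      pvLoopA l (i+1) box (stack ++ [i]) (als ++ [PySem.Set.empty])
    else if c = ')' then
      (if stack.isEmpty then "NO"
       else
         let j := stack.getLastD 0
         let stack' := stack.dropLast
         let letters := als.getLastD PySem.Set.empty
         let als' := als.dropLast
         if ! pvIsGood ((l.drop j).take (i + 1 - j)) then "NO"
         else pvLoopA l (i+1) (letters.foldl PySem.Set.discard box) stack' als')
    else pvLoopA l (i+1) box stack als
  else
    if stack.isEmpty then "YES" else "NO"
termination_by l.length - i
decreasing_by all_goals omega

def check_parentheses_and_letters (S : String) : String :=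
  pvLoopA S.toList 0 PySem.Set.empty [] []

-- ===== PORT B =====

-- Source B's parse(i, active): scan one scope; return the index of the ')' closing it, the length of
-- the string if the end is reached, or none on a violation. The subtype bound i ≤ j ≤ len is the
-- totality guard for the `parse(j + 1, active)` resumption call.
def pvParse (l : List Char) (i : Nat) (active : PySem.Set Char) :
    Option {j : Nat // i ≤ j ∧ (i ≤ l.length → j ≤ l.length)} :=
  if h : i < l.length then
    if l[i] = ')' then some ⟨i, by omega⟩
    else if l[i] = '(' then
      match pvParse l (i+1) active with
      | none => none
      | some ⟨j, hj⟩ =>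
        if h2 : j < l.length then
          match pvParse l (j+1) active with
          | none => none
          | some ⟨k, hk⟩ => some ⟨k, by omega⟩
        else none
    else if PySem.Chars.islower l[i] then
      (if active.contains l[i] then none
       else (pvParse l (i+1) (active.add l[i])).map fun ⟨j, hj⟩ => ⟨j, by omega⟩)
    else (pvParse l (i+1) active).map fun ⟨j, hj⟩ => ⟨j, by omega⟩
  else some ⟨i, by omega⟩
termination_by l.length - i
decreasing_by all_goals omega

def check_parentheses_and_letters_alt (S : String) : String :=
  match pvParse S.toList 0 PySem.Set.empty with
  | some ⟨j, _⟩ => if j = S.toList.length then "YES" else "NO"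
  | none => "NO"

-- ===== PRECONDITION & SPEC =====
def Spec_check_parentheses_and_letters (S : String) (out : String) : Prop := out = check_parentheses_and_letters_alt S
instance (S : String) (out : String) : Decidable (Spec_check_parentheses_and_letters S out) := by unfold Spec_check_parentheses_and_letters; infer_instance

-- ===== CLAIM (what is proved, stated in full; the proofs are below) =====
def Claim_equal_check_parentheses_and_letters : Prop := ∀ (S : String), Dom_check_parentheses_and_letters S → Spec_check_parentheses_and_letters S (check_parentheses_and_letters S)

-- ===== LEMMAS AND PROOFS =====

def pvDelta (c : Char) : Int := if c = '(' then 1 else if c = ')' then -1 else 0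

def pvNet (s : List Char) : Int := (s.map pvDelta).sum

def pvPref : List Char → Int → Bool
  | [], _ => true
  | c :: cs, b => (decide (0 ≤ b + pvDelta c)) && pvPref cs (b + pvDelta c)

-- a segment is "good": balanced and never dipping below its starting level
def pvGood (s : List Char) : Prop := pvNet s = 0 ∧ pvPref s 0 = true

def pvSeg (l : List Char) (a b : Nat) : List Char := (l.drop a).take (b - a)

lemma pvNet_append (s t : List Char) : pvNet (s ++ t) = pvNet s + pvNet t := by
  simp [pvNet]

lemma pvIsGoodAux_cons (c : Char) (cs : List Char) (b : Int) :
    pvIsGoodAux (c :: cs) b = (if b + pvDelta c < 0 then false else pvIsGoodAux cs (b + pvDelta c)) := by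
  simp [pvIsGoodAux, pvDelta]

lemma pvIsGoodAux_eq (s : List Char) : ∀ b, pvIsGoodAux s b = (pvPref s b && decide (b + pvNet s = 0)) := by
  induction s with
  | nil =>
    intro b
    simp only [pvIsGoodAux, pvPref, pvNet, List.map_nil, List.sum_nil, Bool.true_and, add_zero]
    by_cases h : b = 0 <;> simp [h]
  | cons c cs ih =>
    intro b
    rw [pvIsGoodAux_cons]
    by_cases hb : b + pvDelta c < 0
    · rw [if_pos hb]
      simp [pvPref, show ¬ (0 ≤ b + pvDelta c) by omega]
    · rw [if_neg hb, ih]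
      have harith : b + pvDelta c + pvNet cs = b + pvNet (c :: cs) := by
        simp [pvNet]; ring
      simp only [pvPref, harith, Bool.and_assoc]
      simp [show (0 ≤ b + pvDelta c) by omega]

lemma pvPref_append (s t : List Char) : ∀ b, pvPref (s ++ t) b = (pvPref s b && pvPref t (b + pvNet s)) := by
  induction s with
  | nil => intro b; simp [pvPref, pvNet]
  | cons c cs ih =>
    intro b
    have harith : b + pvDelta c + pvNet cs = b + pvNet (c :: cs) := by
      simp [pvNet]; ring
    simp only [List.cons_append, pvPref, ih, harith, Bool.and_assoc]

lemma pvPref_mono (s : List Char) : ∀ b b', b ≤ b' → pvPref s b = true → pvPref s b' = true := by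
  induction s with
  | nil => intros; simp [pvPref]
  | cons c cs ih =>
    intro b b' hbb h
    simp only [pvPref, Bool.and_eq_true, decide_eq_true_eq] at h ⊢
    exact ⟨by omega, ih _ _ (by omega) h.2⟩

lemma pvGood_append {s t : List Char} (hs : pvGood s) (ht : pvGood t) : pvGood (s ++ t) := by
  obtain ⟨hn1, hp1⟩ := hs; obtain ⟨hn2, hp2⟩ := ht
  refine ⟨by rw [pvNet_append]; omega, ?_⟩
  rw [pvPref_append, hn1]; simp [hp1, hp2]

lemma pvGood_single {c : Char} (h : pvDelta c = 0) : pvGood [c] := by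
  constructor <;> simp [pvNet, pvPref, h]

lemma pvGood_paren {t : List Char} (ht : pvGood t) : pvGood ('(' :: (t ++ [')'])) := by
  obtain ⟨hn, hp⟩ := ht
  constructor
  · simp [pvNet, pvDelta] at hn ⊢; omega
  · show pvPref ('(' :: (t ++ [')'])) 0 = true
    have h1 : pvPref t 1 = true := pvPref_mono t 0 1 (by omega) hp
    simp [pvPref, pvPref_append, pvDelta, hn, h1]

lemma pvIsGood_of_good {t : List Char} (ht : pvGood t) : pvIsGood ('(' :: (t ++ [')'])) = true := by
  have := pvGood_paren ht
  obtain ⟨hn, hp⟩ := this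
  rw [pvIsGood, pvIsGoodAux_eq]
  simp [hp, hn]

-- segment algebra
lemma pvSeg_self (l : List Char) (a : Nat) : pvSeg l a a = [] := by simp [pvSeg]

lemma pvSeg_split (l : List Char) {a b c : Nat} (hab : a ≤ b) (hbc : b ≤ c) :
    pvSeg l a c = pvSeg l a b ++ pvSeg l b c := by
  unfold pvSeg
  have h1 : c - a = (b - a) + (c - b) := by omega
  rw [h1, List.take_add, List.drop_drop, show a + (b - a) = b by omega]

lemma pvSeg_single (l : List Char) {a : Nat} (h : a < l.length) : pvSeg l a (a+1) = [l[a]] := by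
  unfold pvSeg
  have : a + 1 - a = 1 := by omega
  rw [this]
  rw [List.take_one]
  simp [List.head?_drop, h]

lemma pvSeg_append_elem (l : List Char) {a i : Nat} (hai : a ≤ i) (hi : i < l.length) :
    pvSeg l a (i+1) = pvSeg l a i ++ [l[i]] := by
  rw [pvSeg_split l hai (by omega : i ≤ i + 1), pvSeg_single l hi]

-- character class facts
lemma pvDelta_of_islower {c : Char} (h : PySem.Chars.islower c = true) : pvDelta c = 0 := by
  have h1 : c ≠ '(' := by rintro rfl; simp [PySem.Chars.islower] at h
  have h2 : c ≠ ')' := by rintro rfl; simp [PySem.Chars.islower] at h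
  simp [pvDelta, h1, h2]

lemma pvMem_foldl_discard (ls : List Char) : ∀ (box : PySem.Set Char) (c : Char),
    c ∈ ls.foldl PySem.Set.discard box ↔ c ∈ box ∧ c ∉ ls := by
  induction ls with
  | nil => simp
  | cons x xs ih =>
    intro box c
    simp only [List.foldl_cons, ih, PySem.Set.mem_discard, List.mem_cons]
    tauto

-- the B-side chain of active sets: position t in [outer₀, …, outer_{d-1}, act]
def pvActAt (outer : List (PySem.Set Char)) (act : PySem.Set Char) (t : Nat) : PySem.Set Char :=
  (outer ++ [act]).getD t PySem.Set.empty

-- structural facts about pvParse: a successful scope scan is a good segment, closed by ')'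
lemma pvParse_some (l : List Char) : ∀ (n i : Nat), l.length - i ≤ n → i ≤ l.length →
    ∀ (act : PySem.Set Char) (j : Nat) (hj : i ≤ j ∧ (i ≤ l.length → j ≤ l.length)),
    pvParse l i act = some ⟨j, hj⟩ →
    pvGood (pvSeg l i j) ∧ (∀ h : j < l.length, l[j] = ')') := by
  intro n
  induction n with
  | zero =>
    intro i hn hi act j hj hp
    rw [pvParse, dif_neg (by omega : ¬ i < l.length)] at hp
    simp only [Option.some.injEq, Subtype.mk.injEq] at hp
    subst hp
    exact ⟨by rw [pvSeg_self]; exact ⟨rfl, rfl⟩, fun h => by omega⟩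
  | succ n ih =>
    intro i hn hi act j hj hp
    by_cases h : i < l.length
    · rw [pvParse, dif_pos h] at hp
      by_cases h1 : l[i] = ')'
      · rw [if_pos h1] at hp
        simp only [Option.some.injEq, Subtype.mk.injEq] at hp
        subst hp
        exact ⟨by rw [pvSeg_self]; exact ⟨rfl, rfl⟩, fun _ => h1⟩
      · rw [if_neg h1] at hp
        by_cases h2 : l[i] = '('
        · rw [if_pos h2] at hp
          cases hr1 : pvParse l (i+1) act with
          | none => rw [hr1] at hp; exact absurd hp (by simp)
          | some p1 =>
            obtain ⟨j1, hj1⟩ := p1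
            rw [hr1] at hp
            simp only at hp
            by_cases hl1 : j1 < l.length
            · rw [dif_pos hl1] at hp
              cases hr2 : pvParse l (j1+1) act with
              | none => rw [hr2] at hp; exact absurd hp (by simp)
              | some p2 =>
                obtain ⟨k, hk⟩ := p2
                rw [hr2] at hp
                simp only [Option.some.injEq, Subtype.mk.injEq] at hp
                subst hp
                have ih1 := ih (i+1) (by omega) (by omega) act j1 hj1 hr1
                have ih2 := ih (j1+1) (by omega) (by omega) act k hk hr2
                have hij1 : i + 1 ≤ j1 := hj1.1
                have hj1j : j1 + 1 ≤ k := hk.1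
                have hcl : l[j1] = ')' := ih1.2 hl1
                have e : pvSeg l i k = ('(' :: (pvSeg l (i+1) j1 ++ [')'])) ++ pvSeg l (j1+1) k := by
                  rw [pvSeg_split l (show i ≤ j1+1 by omega) hj1j,
                      pvSeg_split l (show i ≤ i+1 by omega) (show i+1 ≤ j1+1 by omega),
                      pvSeg_split l hij1 (show j1 ≤ j1+1 by omega),
                      pvSeg_single l h, pvSeg_single l hl1, h2, hcl]
                  simp
                refine ⟨by rw [e]; exact pvGood_append (pvGood_paren ih1.1) ih2.1, ih2.2⟩
            · rw [dif_neg hl1] at hp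
              exact absurd hp (by simp)
        · rw [if_neg h2] at hp
          by_cases h3 : PySem.Chars.islower l[i]
          · rw [if_pos h3] at hp
            by_cases h4 : act.contains l[i]
            · rw [if_pos h4] at hp; exact absurd hp (by simp)
            · rw [if_neg h4] at hp
              cases hr1 : pvParse l (i+1) (act.add l[i]) with
              | none => rw [hr1] at hp; exact absurd hp (by simp)
              | some p1 =>
                obtain ⟨j1, hj1⟩ := p1
                rw [hr1] at hp
                simp only [Option.map_some, Option.some.injEq, Subtype.mk.injEq] at hp
                subst hp
                have ih1 := ih (i+1) (by omega) (by omega) (act.add l[i]) j1 hj1 hr1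
                have e : pvSeg l i j1 = [l[i]] ++ pvSeg l (i+1) j1 := by
                  rw [pvSeg_split l (show i ≤ i+1 by omega) (show i+1 ≤ j1 from hj1.1),
                      pvSeg_single l h]
                refine ⟨by rw [e]; exact pvGood_append (pvGood_single (pvDelta_of_islower h3)) ih1.1, ih1.2⟩
          · rw [if_neg h3] at hp
            cases hr1 : pvParse l (i+1) act with
            | none => rw [hr1] at hp; exact absurd hp (by simp)
            | some p1 =>
              obtain ⟨j1, hj1⟩ := p1
              rw [hr1] at hp
              simp only [Option.map_some, Option.some.injEq, Subtype.mk.injEq] at hp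
              subst hp
              have ih1 := ih (i+1) (by omega) (by omega) act j1 hj1 hr1
              have e : pvSeg l i j1 = [l[i]] ++ pvSeg l (i+1) j1 := by
                rw [pvSeg_split l (show i ≤ i+1 by omega) (show i+1 ≤ j1 from hj1.1),
                    pvSeg_single l h]
              have hd : pvDelta l[i] = 0 := by simp [pvDelta, h1, h2]
              refine ⟨by rw [e]; exact pvGood_append (pvGood_single hd) ih1.1, ih1.2⟩
    · rw [pvParse, dif_neg h] at hp
      simp only [Option.some.injEq, Subtype.mk.injEq] at hp
      subst hp
      exact ⟨by rw [pvSeg_self]; exact ⟨rfl, rfl⟩, fun hh => by omega⟩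


-- small list-index helpers used by the simulation proof
lemma pvGetD_concat_len {α : Type} (xs : List α) (y : α) (d : α) :
    (xs ++ [y]).getD xs.length d = y := by
  simp [List.getD_eq_getElem?_getD]

lemma pvGetLastD_eq {α : Type} (xs : List α) (d : α) :
    xs.getLastD d = xs.getD (xs.length - 1) d := by
  rw [List.getLastD_eq_getLast?, List.getLast?_eq_getElem?, List.getD_eq_getElem?_getD]

lemma pvGetD_dropLast {α : Type} (xs : List α) (t : Nat) (d : α) (h : t < xs.length - 1) :
    xs.dropLast.getD t d = xs.getD t d := by
  rw [List.getD_eq_getElem?_getD, List.getD_eq_getElem?_getD, List.getElem?_dropLast, if_pos h]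

lemma pvActAt_lt (outer : List (PySem.Set Char)) (act : PySem.Set Char) (t : Nat)
    (h : t < outer.length) : pvActAt outer act t = outer.getD t PySem.Set.empty := by
  unfold pvActAt
  exact List.getD_append outer [act] PySem.Set.empty t h

lemma pvActAt_len (outer : List (PySem.Set Char)) (act : PySem.Set Char) :
    pvActAt outer act outer.length = act := by
  unfold pvActAt
  exact pvGetD_concat_len outer act PySem.Set.empty

-- one-step unfoldings of A's loop, one per branch of the Python for-body
lemma pvLoopA_end (l : List Char) (i : Nat) (box : PySem.Set Char) (stack : List Nat)
    (als : List (PySem.Set Char)) (h : ¬ i < l.length) :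
    pvLoopA l i box stack als = if stack.isEmpty then "YES" else "NO" := by
  rw [pvLoopA, dif_neg h]

lemma pvLoopA_lower_no (l : List Char) (i : Nat) (box : PySem.Set Char) (stack : List Nat)
    (als : List (PySem.Set Char)) (h : i < l.length)
    (h3 : PySem.Chars.islower l[i] = true) (h4 : box.contains l[i] = true) :
    pvLoopA l i box stack als = "NO" := by
  rw [pvLoopA, dif_pos h]
  simp only [h3, h4, if_true]

lemma pvLoopA_lower (l : List Char) (i : Nat) (box : PySem.Set Char) (stack : List Nat)
    (als : List (PySem.Set Char)) (h : i < l.length)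
    (h3 : PySem.Chars.islower l[i] = true) (h4 : box.contains l[i] = false) :
    pvLoopA l i box stack als =
      pvLoopA l (i+1) (box.add l[i]) stack
        (if als.isEmpty then als
         else als.dropLast ++ [(als.getLastD PySem.Set.empty).add l[i]]) := by
  rw [pvLoopA, dif_pos h]
  simp only [h3, h4, if_true, Bool.false_eq_true, if_false]

lemma pvLoopA_open (l : List Char) (i : Nat) (box : PySem.Set Char) (stack : List Nat)
    (als : List (PySem.Set Char)) (h : i < l.length)
    (_h3 : PySem.Chars.islower l[i] = false) (h2 : l[i] = '(') :
    pvLoopA l i box stack als = pvLoopA l (i+1) box (stack ++ [i]) (als ++ [PySem.Set.empty]) := by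
  rw [pvLoopA, dif_pos h]
  simp only [h2]
  rw [if_neg (by decide : ¬ PySem.Chars.islower '(' = true), if_pos trivial]

lemma pvLoopA_close_no (l : List Char) (i : Nat) (box : PySem.Set Char) (stack : List Nat)
    (als : List (PySem.Set Char)) (h : i < l.length)
    (_h3 : PySem.Chars.islower l[i] = false) (h1 : l[i] = ')') (hst : stack.isEmpty = true) :
    pvLoopA l i box stack als = "NO" := by
  rw [pvLoopA, dif_pos h]
  simp only [h1]
  rw [if_neg (by decide : ¬ PySem.Chars.islower ')' = true),
      if_neg (by decide : ¬ (')' = '(')), if_pos trivial, if_pos hst]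

lemma pvLoopA_close (l : List Char) (i : Nat) (box : PySem.Set Char) (stack : List Nat)
    (als : List (PySem.Set Char)) (h : i < l.length)
    (_h3 : PySem.Chars.islower l[i] = false) (h1 : l[i] = ')') (hst : stack.isEmpty = false)
    (hg : pvIsGood ((l.drop (stack.getLastD 0)).take (i + 1 - stack.getLastD 0)) = true) :
    pvLoopA l i box stack als =
      pvLoopA l (i+1) ((als.getLastD PySem.Set.empty).foldl PySem.Set.discard box)
        stack.dropLast als.dropLast := by
  rw [pvLoopA, dif_pos h]
  simp only [h1]
  rw [if_neg (by decide : ¬ PySem.Chars.islower ')' = true),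
      if_neg (by decide : ¬ (')' = '(')), if_pos trivial,
      if_neg (show ¬ stack.isEmpty = true by simp [hst])]
  simp only [hg, Bool.not_true, Bool.false_eq_true, if_false]

lemma pvLoopA_other (l : List Char) (i : Nat) (box : PySem.Set Char) (stack : List Nat)
    (als : List (PySem.Set Char)) (h : i < l.length)
    (h3 : PySem.Chars.islower l[i] = false) (h2 : ¬ l[i] = '\u0028') (h1 : ¬ l[i] = ')') :
    pvLoopA l i box stack als = pvLoopA l (i+1) box stack als := by
  rw [pvLoopA, dif_pos h]
  simp only [h3, h2, h1, Bool.false_eq_true, if_false]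

-- the main simulation: A's loop from a linked state equals the continuation of B's parse
lemma pvMain (l : List Char) : ∀ (n i : Nat), l.length - i ≤ n → i ≤ l.length →
    ∀ (box act : PySem.Set Char) (stack : List Nat) (als outer : List (PySem.Set Char)),
    als.length = stack.length → outer.length = stack.length →
    (∀ c, c ∈ box ↔ c ∈ act) →
    (∀ t, t < stack.length → ∀ c,
      c ∈ pvActAt outer act t ↔ (c ∈ pvActAt outer act (t+1) ∧ c ∉ als.getD t PySem.Set.empty)) →
    (∀ t, t < stack.length →
      (stack.getD t 0 < (if t+1 < stack.length then stack.getD (t+1) 0 else i)) ∧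
      (∃ h : stack.getD t 0 < l.length, l[stack.getD t 0] = '(') ∧
      pvGood (pvSeg l (stack.getD t 0 + 1) (if t+1 < stack.length then stack.getD (t+1) 0 else i))) →
    ((pvParse l i act = none → pvLoopA l i box stack als = "NO") ∧
     (∀ (j : Nat) (hj : i ≤ j ∧ (i ≤ l.length → j ≤ l.length)),
       pvParse l i act = some ⟨j, hj⟩ →
       ((j = l.length → pvLoopA l i box stack als = (if stack.isEmpty then "YES" else "NO")) ∧
        (j ≠ l.length → stack.isEmpty = true → pvLoopA l i box stack als = "NO") ∧
        (j ≠ l.length → stack.isEmpty = false →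
          ∃ box2, (∀ c, c ∈ box2 ↔ c ∈ outer.getLastD PySem.Set.empty) ∧
            pvLoopA l i box stack als = pvLoopA l (j+1) box2 stack.dropLast als.dropLast)))) := by
  intro n
  induction n with
  | zero =>
    intro i hn hi box act stack als outer hlen1 hlen2 hbox hchain hseg
    have h : ¬ i < l.length := by omega
    have hcomp : pvParse l i act = some ⟨i, ⟨le_refl i, fun _ => by omega⟩⟩ := by
      rw [pvParse, dif_neg h]
    refine ⟨fun hn0 => by rw [hcomp] at hn0; simp at hn0, ?_⟩
    intro j hj hp
    rw [hcomp] at hp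
    simp only [Option.some.injEq, Subtype.mk.injEq] at hp
    subst hp
    exact ⟨fun _ => pvLoopA_end l i box stack als h,
           fun hne _ => absurd (by omega : i = l.length) hne,
           fun hne _ => absurd (by omega : i = l.length) hne⟩
  | succ n ih =>
    intro i hn hi box act stack als outer hlen1 hlen2 hbox hchain hseg
    by_cases h : i < l.length
    case neg =>
      have hcomp : pvParse l i act = some ⟨i, ⟨le_refl i, fun _ => by omega⟩⟩ := by
        rw [pvParse, dif_neg h]
      refine ⟨fun hn0 => by rw [hcomp] at hn0; simp at hn0, ?_⟩
      intro j hj hp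
      rw [hcomp] at hp
      simp only [Option.some.injEq, Subtype.mk.injEq] at hp
      subst hp
      exact ⟨fun _ => pvLoopA_end l i box stack als h,
             fun hne _ => absurd (by omega : i = l.length) hne,
             fun hne _ => absurd (by omega : i = l.length) hne⟩
    case pos =>
    by_cases h1 : l[i] = ')'
    · -- close a scope
      have h3 : PySem.Chars.islower l[i] = false := by rw [h1]; decide
      have hcomp : pvParse l i act = some ⟨i, ⟨le_refl i, fun _ => by omega⟩⟩ := by
        rw [pvParse, dif_pos h, if_pos h1]
      refine ⟨fun hn0 => by rw [hcomp] at hn0; simp at hn0, ?_⟩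
      intro j hj hp
      rw [hcomp] at hp
      simp only [Option.some.injEq, Subtype.mk.injEq] at hp
      subst hp
      refine ⟨fun hjl => absurd hjl (by omega),
              fun _ hst => pvLoopA_close_no l i box stack als h h3 h1 hst,
              fun _ hst => ?_⟩
      have hd : 0 < stack.length := by
        cases stack with
        | nil => simp at hst
        | cons a b => simp
      obtain ⟨hlt0, hop0, hgood0⟩ := hseg (stack.length - 1) (by omega)
      rw [if_neg (by omega)] at hlt0 hgood0
      obtain ⟨hjl0, hjp0⟩ := hop0
      have hsegeq : (l.drop (stack.getLastD 0)).take (i + 1 - stack.getLastD 0)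
          = '(' :: (pvSeg l (stack.getD (stack.length - 1) 0 + 1) i ++ [')']) := by
        rw [pvGetLastD_eq]
        show pvSeg l (stack.getD (stack.length - 1) 0) (i+1) = _
        rw [pvSeg_split l (show stack.getD (stack.length - 1) 0 ≤ stack.getD (stack.length - 1) 0 + 1 by omega)
              (show stack.getD (stack.length - 1) 0 + 1 ≤ i + 1 by omega),
            pvSeg_split l (show stack.getD (stack.length - 1) 0 + 1 ≤ i by omega) (show i ≤ i + 1 by omega),
            pvSeg_single l hjl0, pvSeg_single l h, hjp0, h1]
        simp
      have hg : pvIsGood ((l.drop (stack.getLastD 0)).take (i + 1 - stack.getLastD 0)) = true := by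
        rw [hsegeq]
        exact pvIsGood_of_good hgood0
      refine ⟨(als.getLastD PySem.Set.empty).foldl PySem.Set.discard box, ?_,
              pvLoopA_close l i box stack als h h3 h1 hst hg⟩
      intro c
      rw [pvMem_foldl_discard]
      have hch := hchain (stack.length - 1) (by omega) c
      rw [pvActAt_lt outer act (stack.length - 1) (by omega),
          show stack.length - 1 + 1 = outer.length by omega, pvActAt_len] at hch
      rw [pvGetLastD_eq als, pvGetLastD_eq outer, hlen1, hlen2]
      constructor
      · rintro ⟨hb, hnm⟩
        exact hch.mpr ⟨(hbox c).mp hb, hnm⟩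
      · intro ho
        obtain ⟨ha, hb⟩ := hch.mp ho
        exact ⟨(hbox c).mpr ha, hb⟩
    · by_cases h2 : l[i] = '('
      · -- open a scope
        have h3 : PySem.Chars.islower l[i] = false := by rw [h2]; decide
        have hA : pvLoopA l i box stack als
            = pvLoopA l (i+1) box (stack ++ [i]) (als ++ [PySem.Set.empty]) :=
          pvLoopA_open l i box stack als h h3 h2
        have hlen1' : (als ++ [PySem.Set.empty]).length = (stack ++ [i]).length := by
          simp [hlen1]
        have hlen2' : (outer ++ [act]).length = (stack ++ [i]).length := by
          simp [hlen2]
        have hred : ∀ s, s ≤ outer.length →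
            pvActAt (outer ++ [act]) act s = pvActAt outer act s := by
          intro s hs
          unfold pvActAt
          exact List.getD_append (outer ++ [act]) [act] PySem.Set.empty s (by simp; omega)
        have hchain' : ∀ t, t < (stack ++ [i]).length → ∀ c,
            c ∈ pvActAt (outer ++ [act]) act t ↔
              (c ∈ pvActAt (outer ++ [act]) act (t+1) ∧
               c ∉ (als ++ [PySem.Set.empty]).getD t PySem.Set.empty) := by
          intro t ht c
          simp only [List.length_append, List.length_cons, List.length_nil] at ht
          by_cases htd : t < stack.length
          · rw [hred t (by omega), hred (t+1) (by omega),
                List.getD_append als [PySem.Set.empty] PySem.Set.empty t (by omega)]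
            exact hchain t htd c
          · have e1 : pvActAt (outer ++ [act]) act t = act := by
              rw [hred t (by omega), show t = outer.length by omega, pvActAt_len]
            have e2 : pvActAt (outer ++ [act]) act (t+1) = act := by
              rw [show t + 1 = (outer ++ [act]).length by simp; omega, pvActAt_len]
            have e3 : (als ++ [PySem.Set.empty]).getD t PySem.Set.empty = PySem.Set.empty := by
              rw [show t = als.length by omega, pvGetD_concat_len]
            rw [e1, e2, e3]
            simp [PySem.Set.empty]
        have hseg' : ∀ t, t < (stack ++ [i]).length →
            ((stack ++ [i]).getD t 0 <
              (if t+1 < (stack ++ [i]).length then (stack ++ [i]).getD (t+1) 0 else i+1)) ∧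
            (∃ hx : (stack ++ [i]).getD t 0 < l.length, l[(stack ++ [i]).getD t 0] = '(') ∧
            pvGood (pvSeg l ((stack ++ [i]).getD t 0 + 1)
              (if t+1 < (stack ++ [i]).length then (stack ++ [i]).getD (t+1) 0 else i+1)) := by
          intro t ht
          simp only [List.length_append, List.length_cons, List.length_nil] at ht ⊢
          by_cases htd : t < stack.length
          · obtain ⟨ha, hb, hc⟩ := hseg t htd
            rw [List.getD_append stack [i] 0 t htd]
            by_cases ht1 : t + 1 < stack.length
            · rw [if_pos (by omega), List.getD_append stack [i] 0 (t+1) ht1]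
              rw [if_pos ht1] at ha hc
              exact ⟨ha, hb, hc⟩
            · rw [if_pos (by omega), show t + 1 = stack.length by omega, pvGetD_concat_len]
              rw [if_neg ht1] at ha hc
              exact ⟨ha, hb, hc⟩
          · rw [if_neg (by omega), show t = stack.length by omega, pvGetD_concat_len]
            exact ⟨by omega, ⟨h, h2⟩, by rw [pvSeg_self]; exact ⟨rfl, rfl⟩⟩
        have IH1 := ih (i+1) (by omega) (by omega) box act (stack ++ [i])
          (als ++ [PySem.Set.empty]) (outer ++ [act]) hlen1' hlen2' hbox hchain' hseg'
        cases hr1 : pvParse l (i+1) act with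
        | none =>
          have hcomp : pvParse l i act = none := by
            rw [pvParse, dif_pos h, if_neg h1, if_pos h2, hr1]
          exact ⟨fun _ => by rw [hA]; exact IH1.1 hr1,
                 fun j hj hp => by rw [hcomp] at hp; simp at hp⟩
        | some p1 =>
          obtain ⟨j1, hj1⟩ := p1
          have htr1 := IH1.2 j1 hj1 hr1
          by_cases hl1 : j1 < l.length
          · -- the child scope closed at j1; resume after it
            have hj1ne : j1 ≠ l.length := by omega
            obtain ⟨box2, hbox2, heq2⟩ := htr1.2.2 hj1ne (by simp)
            simp only [List.dropLast_concat] at heq2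
            rw [List.getLastD_concat] at hbox2
            have hps := pvParse_some l l.length (i+1) (by omega) (by omega) act j1 hj1 hr1
            have hij1 : i + 1 ≤ j1 := hj1.1
            have hseg2 : ∀ t, t < stack.length →
                (stack.getD t 0 < (if t+1 < stack.length then stack.getD (t+1) 0 else j1+1)) ∧
                (∃ hx : stack.getD t 0 < l.length, l[stack.getD t 0] = '(') ∧
                pvGood (pvSeg l (stack.getD t 0 + 1)
                  (if t+1 < stack.length then stack.getD (t+1) 0 else j1+1)) := by
              intro t ht
              obtain ⟨ha, hb, hc⟩ := hseg t ht
              by_cases ht1 : t + 1 < stack.length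
              · rw [if_pos ht1]
                rw [if_pos ht1] at ha hc
                exact ⟨ha, hb, hc⟩
              · rw [if_neg ht1]
                rw [if_neg ht1] at ha hc
                refine ⟨by omega, hb, ?_⟩
                have e : pvSeg l (stack.getD t 0 + 1) (j1+1) =
                    pvSeg l (stack.getD t 0 + 1) i ++ ('(' :: (pvSeg l (i+1) j1 ++ [')'])) := by
                  rw [pvSeg_split l (show stack.getD t 0 + 1 ≤ i by omega) (show i ≤ j1 + 1 by omega),
                      pvSeg_split l (show i ≤ i + 1 by omega) (show i + 1 ≤ j1 + 1 by omega),
                      pvSeg_split l (show i + 1 ≤ j1 by omega) (show j1 ≤ j1 + 1 by omega),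
                      pvSeg_single l h, pvSeg_single l hl1, h2, hps.2 hl1]
                  simp
                rw [e]
                exact pvGood_append hc (pvGood_paren hps.1)
            have IH2 := ih (j1+1) (by omega) (by omega) box2 act stack als outer
              hlen1 hlen2 hbox2 hchain hseg2
            cases hr2 : pvParse l (j1+1) act with
            | none =>
              have hcomp : pvParse l i act = none := by
                rw [pvParse, dif_pos h, if_neg h1, if_pos h2, hr1]
                dsimp only
                rw [dif_pos hl1, hr2]
              exact ⟨fun _ => by rw [hA, heq2]; exact IH2.1 hr2,
                     fun j hj hp => by rw [hcomp] at hp; simp at hp⟩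
            | some p2 =>
              obtain ⟨k, hk⟩ := p2
              have hik : i ≤ k := by have := hk.1; omega
              have hcomp : pvParse l i act = some ⟨k, ⟨hik, fun _ => hk.2 (by omega)⟩⟩ := by
                rw [pvParse, dif_pos h, if_neg h1, if_pos h2, hr1]
                dsimp only
                rw [dif_pos hl1, hr2]
              have htr2 := IH2.2 k hk hr2
              refine ⟨fun hn0 => by rw [hcomp] at hn0; simp at hn0, ?_⟩
              intro j hj hp
              rw [hcomp] at hp
              simp only [Option.some.injEq, Subtype.mk.injEq] at hp
              subst hp
              exact ⟨fun hkl => by rw [hA, heq2]; exact htr2.1 hkl,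
                     fun hkne hst => by rw [hA, heq2]; exact htr2.2.1 hkne hst,
                     fun hkne hst => by
                       obtain ⟨box3, hb3, he3⟩ := htr2.2.2 hkne hst
                       exact ⟨box3, hb3, by rw [hA, heq2, he3]⟩⟩
          · -- the child scope ran to the end of the string: unmatched '('
            have hj1e : j1 = l.length := by have := hj1.2 (by omega); omega
            have hcomp : pvParse l i act = none := by
              rw [pvParse, dif_pos h, if_neg h1, if_pos h2, hr1]
              dsimp only
              rw [dif_neg hl1]
            have hNO : pvLoopA l i box stack als = "NO" := by
              rw [hA, htr1.1 hj1e]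
              simp
            exact ⟨fun _ => hNO, fun j hj hp => by rw [hcomp] at hp; simp at hp⟩
      · by_cases h3 : PySem.Chars.islower l[i] = true
        · -- a lowercase letter
          by_cases h4 : act.contains l[i] = true
          · have hb4 : box.contains l[i] = true := by
              rw [PySem.Set.contains_iff] at h4 ⊢
              exact (hbox _).mpr h4
            have hcomp : pvParse l i act = none := by
              rw [pvParse, dif_pos h, if_neg h1, if_neg h2, if_pos h3, if_pos h4]
            exact ⟨fun _ => pvLoopA_lower_no l i box stack als h h3 hb4,
                   fun j hj hp => by rw [hcomp] at hp; simp at hp⟩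
          · have h4f : act.contains l[i] = false := by
              cases hcb : act.contains l[i] with
              | false => rfl
              | true => exact absurd hcb h4
            have hb4 : box.contains l[i] = false := by
              cases hcb : box.contains l[i] with
              | false => rfl
              | true =>
                exact absurd ((PySem.Set.contains_iff act _).mpr
                  ((hbox _).mp ((PySem.Set.contains_iff box _).mp hcb))) h4
            have hnotin : l[i] ∉ act := fun hm => h4 ((PySem.Set.contains_iff act _).mpr hm)
            have hA := pvLoopA_lower l i box stack als h h3 hb4
            have hdrop : (if als.isEmpty then als
                else als.dropLast ++ [(als.getLastD PySem.Set.empty).add l[i]]).dropLast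
                = als.dropLast := by
              by_cases halsE : als.isEmpty
              · rw [if_pos halsE]
              · rw [if_neg halsE, List.dropLast_concat]
            have hlen1'' : (if als.isEmpty then als
                else als.dropLast ++ [(als.getLastD PySem.Set.empty).add l[i]]).length
                = stack.length := by
              by_cases halsE : als.isEmpty
              · rw [if_pos halsE]; exact hlen1
              · rw [if_neg halsE, List.length_append, List.length_dropLast]
                have : als ≠ [] := by simpa using halsE
                have : 0 < als.length := List.length_pos_of_ne_nil this
                simp
                omega
            have halsne : 0 < stack.length → als.isEmpty = false := by
              intro hd0
              cases halsE : als.isEmpty with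
              | false => rfl
              | true =>
                have : als = [] := List.isEmpty_iff.mp halsE
                rw [this] at hlen1
                simp at hlen1
                omega
            have halsgetD : ∀ t, t < stack.length - 1 →
                (if als.isEmpty then als
                 else als.dropLast ++ [(als.getLastD PySem.Set.empty).add l[i]]).getD t PySem.Set.empty
                = als.getD t PySem.Set.empty := by
              intro t ht
              rw [if_neg (by simp [halsne (by omega)]),
                  List.getD_append _ _ PySem.Set.empty t (by rw [List.length_dropLast]; omega),
                  pvGetD_dropLast als t PySem.Set.empty (by omega)]
            have halstop : 0 < stack.length →
                (if als.isEmpty then als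
                 else als.dropLast ++ [(als.getLastD PySem.Set.empty).add l[i]]).getD
                  (stack.length - 1) PySem.Set.empty
                = (als.getD (stack.length - 1) PySem.Set.empty).add l[i] := by
              intro hd0
              rw [if_neg (by simp [halsne hd0]),
                  show stack.length - 1 = als.dropLast.length by rw [List.length_dropLast]; omega,
                  pvGetD_concat_len, pvGetLastD_eq, List.length_dropLast, hlen1]
            have hbox'' : ∀ c, c ∈ box.add l[i] ↔ c ∈ act.add l[i] := by
              intro c
              rw [PySem.Set.mem_add, PySem.Set.mem_add]
              exact or_congr_left (hbox c)
            have hchain'' : ∀ t, t < stack.length → ∀ c,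
                c ∈ pvActAt outer (act.add l[i]) t ↔
                  (c ∈ pvActAt outer (act.add l[i]) (t+1) ∧
                   c ∉ (if als.isEmpty then als
                        else als.dropLast ++ [(als.getLastD PySem.Set.empty).add l[i]]).getD t
                        PySem.Set.empty) := by
              intro t ht c
              have hch := hchain t ht c
              rw [pvActAt_lt outer act t (by omega)] at hch
              rw [pvActAt_lt outer (act.add l[i]) t (by omega)]
              by_cases ht1 : t + 1 < stack.length
              · rw [pvActAt_lt outer (act.add l[i]) (t+1) (by omega), halsgetD t (by omega)]
                rw [pvActAt_lt outer act (t+1) (by omega)] at hch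
                exact hch
              · rw [show t + 1 = outer.length by omega, pvActAt_len,
                    show t = stack.length - 1 by omega, halstop (by omega)]
                rw [show t + 1 = outer.length by omega, pvActAt_len] at hch
                rw [show t = stack.length - 1 by omega] at hch
                rw [PySem.Set.mem_add, PySem.Set.mem_add]
                constructor
                · intro ho
                  obtain ⟨hact, hnals⟩ := hch.mp ho
                  exact ⟨Or.inl hact,
                         fun hor => hor.elim hnals (fun e => hnotin (e ▸ hact))⟩
                · rintro ⟨hor, hnor⟩
                  have hcne : c ≠ l[i] := fun e => hnor (Or.inr e)
                  exact hch.mpr ⟨hor.resolve_right hcne, fun hm => hnor (Or.inl hm)⟩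
            have hseg'' : ∀ t, t < stack.length →
                (stack.getD t 0 < (if t+1 < stack.length then stack.getD (t+1) 0 else i+1)) ∧
                (∃ hx : stack.getD t 0 < l.length, l[stack.getD t 0] = '(') ∧
                pvGood (pvSeg l (stack.getD t 0 + 1)
                  (if t+1 < stack.length then stack.getD (t+1) 0 else i+1)) := by
              intro t ht
              obtain ⟨ha, hb, hc⟩ := hseg t ht
              by_cases ht1 : t + 1 < stack.length
              · rw [if_pos ht1]
                rw [if_pos ht1] at ha hc
                exact ⟨ha, hb, hc⟩
              · rw [if_neg ht1]
                rw [if_neg ht1] at ha hc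
                refine ⟨by omega, hb, ?_⟩
                rw [pvSeg_append_elem l (show stack.getD t 0 + 1 ≤ i by omega) h]
                exact pvGood_append hc (pvGood_single (pvDelta_of_islower h3))
            have IH1 := ih (i+1) (by omega) (by omega) (box.add l[i]) (act.add l[i]) stack
              (if als.isEmpty then als
               else als.dropLast ++ [(als.getLastD PySem.Set.empty).add l[i]]) outer
              hlen1'' hlen2 hbox'' hchain'' hseg''
            cases hr1 : pvParse l (i+1) (act.add l[i]) with
            | none =>
              have hcomp : pvParse l i act = none := by
                rw [pvParse, dif_pos h, if_neg h1, if_neg h2, if_pos h3,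
                    if_neg (show ¬ act.contains l[i] = true by rw [h4f]; simp), hr1]
                rfl
              exact ⟨fun _ => by rw [hA]; exact IH1.1 hr1,
                     fun j hj hp => by rw [hcomp] at hp; simp at hp⟩
            | some p1 =>
              obtain ⟨j1, hj1⟩ := p1
              have hij1 : i ≤ j1 := by have := hj1.1; omega
              have hcomp : pvParse l i act = some ⟨j1, ⟨hij1, fun _ => hj1.2 (by omega)⟩⟩ := by
                rw [pvParse, dif_pos h, if_neg h1, if_neg h2, if_pos h3,
                    if_neg (show ¬ act.contains l[i] = true by rw [h4f]; simp), hr1]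
                rfl
              have htr1 := IH1.2 j1 hj1 hr1
              refine ⟨fun hn0 => by rw [hcomp] at hn0; simp at hn0, ?_⟩
              intro j hj hp
              rw [hcomp] at hp
              simp only [Option.some.injEq, Subtype.mk.injEq] at hp
              subst hp
              refine ⟨fun hjl => by rw [hA]; exact htr1.1 hjl,
                      fun hne hst => by rw [hA]; exact htr1.2.1 hne hst,
                      fun hne hst => ?_⟩
              obtain ⟨box2, hb2, he2⟩ := htr1.2.2 hne hst
              exact ⟨box2, hb2, by rw [hA, he2, hdrop]⟩
        · -- any other character: ignored by both programs
          have h3f : PySem.Chars.islower l[i] = false := by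
            cases hc3 : PySem.Chars.islower l[i] with
            | false => rfl
            | true => exact absurd hc3 h3
          have hA := pvLoopA_other l i box stack als h h3f h2 h1
          have hseg'' : ∀ t, t < stack.length →
              (stack.getD t 0 < (if t+1 < stack.length then stack.getD (t+1) 0 else i+1)) ∧
              (∃ hx : stack.getD t 0 < l.length, l[stack.getD t 0] = '(') ∧
              pvGood (pvSeg l (stack.getD t 0 + 1)
                (if t+1 < stack.length then stack.getD (t+1) 0 else i+1)) := by
            intro t ht
            obtain ⟨ha, hb, hc⟩ := hseg t ht
            by_cases ht1 : t + 1 < stack.length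
            · rw [if_pos ht1]
              rw [if_pos ht1] at ha hc
              exact ⟨ha, hb, hc⟩
            · rw [if_neg ht1]
              rw [if_neg ht1] at ha hc
              refine ⟨by omega, hb, ?_⟩
              rw [pvSeg_append_elem l (show stack.getD t 0 + 1 ≤ i by omega) h]
              exact pvGood_append hc (pvGood_single (by simp [pvDelta, h1, h2]))
          have IH1 := ih (i+1) (by omega) (by omega) box act stack als outer
            hlen1 hlen2 hbox hchain hseg''
          cases hr1 : pvParse l (i+1) act with
          | none =>
            have hcomp : pvParse l i act = none := by
              rw [pvParse, dif_pos h, if_neg h1, if_neg h2,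
                  if_neg (show ¬ PySem.Chars.islower l[i] = true by rw [h3f]; simp), hr1]
              rfl
            exact ⟨fun _ => by rw [hA]; exact IH1.1 hr1,
                   fun j hj hp => by rw [hcomp] at hp; simp at hp⟩
          | some p1 =>
            obtain ⟨j1, hj1⟩ := p1
            have hij1 : i ≤ j1 := by have := hj1.1; omega
            have hcomp : pvParse l i act = some ⟨j1, ⟨hij1, fun _ => hj1.2 (by omega)⟩⟩ := by
              rw [pvParse, dif_pos h, if_neg h1, if_neg h2,
                  if_neg (show ¬ PySem.Chars.islower l[i] = true by rw [h3f]; simp), hr1]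
              rfl
            have htr1 := IH1.2 j1 hj1 hr1
            refine ⟨fun hn0 => by rw [hcomp] at hn0; simp at hn0, ?_⟩
            intro j hj hp
            rw [hcomp] at hp
            simp only [Option.some.injEq, Subtype.mk.injEq] at hp
            subst hp
            exact ⟨fun hjl => by rw [hA]; exact htr1.1 hjl,
                   fun hne hst => by rw [hA]; exact htr1.2.1 hne hst,
                   fun hne hst => by
                     obtain ⟨box2, hb2, he2⟩ := htr1.2.2 hne hst
                     exact ⟨box2, hb2, by rw [hA, he2]⟩⟩

-- ===== VERDICT (by name: the statement is the Claim_ definition above) =====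
theorem check_parentheses_and_letters_spec : Claim_equal_check_parentheses_and_letters := by
  intro S _hDom
  unfold Spec_check_parentheses_and_letters check_parentheses_and_letters check_parentheses_and_letters_alt
  obtain ⟨hnone, hsome⟩ := pvMain S.toList S.toList.length 0 (by omega) (Nat.zero_le _)
    PySem.Set.empty PySem.Set.empty [] [] []
    rfl rfl (fun c => Iff.rfl) (fun t ht => absurd ht (by simp)) (fun t ht => absurd ht (by simp))
  cases hp : pvParse S.toList 0 PySem.Set.empty with
  | none => exact hnone hp
  | some jp =>
    obtain ⟨j, hj⟩ := jp
    dsimp only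
    have htr := hsome j hj hp
    by_cases hjl : j = S.toList.length
    · rw [if_pos hjl, htr.1 hjl]
      rfl
    · rw [if_neg hjl, htr.2.1 hjl rfl]
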